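-- pv_equiv track=rewrite | github.com/borhen-yahiaoui/Optitrack_algo | analysing voice.py | group_to_three
-- ===== SOURCE A (Python) =====
-- def group_to_three(keys):
--     groups = {"head": [], "left hand": [], "right hand": []}
--     for name in keys:
--         n = name.lower()
--         if "left hand"  in n: groups["left hand"].append(name)
--         elif "right hand" in n: groups["right hand"].append(name)
--         elif "head" in n: groups["head"].append(name)
--     return groups
-- ===== SOURCE B (Python) =====
-- def group_to_three(keys):
--     return {
--         "head": [k for k in keys if "head" in k.lower()
--                  and "left hand" not in k.lower() and "right hand" not in k.lower()],
--         "left hand": [k for k in keys if "left hand" in k.lower()],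
--         "right hand": [k for k in keys if "right hand" in k.lower()
--                        and "left hand" not in k.lower()],
--     }
-- ===== Notes on version B (the rewrite author's own statement) =====
-- stated objective: idiomatic
-- what changed: Replaces the single dispatch loop that mutates a dict of lists by three independent list comprehensions (one filtering pass per group), encoding the elif priority as explicit negated membership conditions.
import Mathlib
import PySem

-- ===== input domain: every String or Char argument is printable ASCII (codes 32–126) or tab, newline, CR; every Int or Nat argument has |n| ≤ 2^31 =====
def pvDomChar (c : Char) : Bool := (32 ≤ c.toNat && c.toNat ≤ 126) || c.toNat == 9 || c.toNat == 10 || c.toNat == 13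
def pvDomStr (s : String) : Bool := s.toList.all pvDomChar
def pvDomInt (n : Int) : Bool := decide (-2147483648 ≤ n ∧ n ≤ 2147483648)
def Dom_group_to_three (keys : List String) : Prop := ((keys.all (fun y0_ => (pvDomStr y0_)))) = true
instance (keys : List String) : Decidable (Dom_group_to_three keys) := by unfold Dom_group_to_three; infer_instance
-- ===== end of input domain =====

-- ===== PORT A =====
-- B replaces A's single dispatch loop that mutates a dict of lists by three independent filtering passes (idiomatic).
-- gttStep is the literal body of A's for-loop (the elif dispatch onto the mutated dict).
def gttStep (groups : PySem.Dict String (List String)) (name : String) : PySem.Dict String (List String) :=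
  let n := PySem.Str.lower name
  if PySem.Str.isIn "left hand" n then groups.modify "left hand" [] (fun xs => xs ++ [name])
  else if PySem.Str.isIn "right hand" n then groups.modify "right hand" [] (fun xs => xs ++ [name])
  else if PySem.Str.isIn "head" n then groups.modify "head" [] (fun xs => xs ++ [name])
  else groups

def group_to_three (keys : List String) : List (String × List String) :=
  (keys.foldl gttStep
    (PySem.Dict.ofList [("head", ([] : List String)), ("left hand", []), ("right hand", [])])).items

-- ===== PORT B =====
def group_to_three_alt (keys : List String) : List (String × List String) :=
  [("head", keys.filter (fun k => PySem.Str.isIn "head" (PySem.Str.lower k)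
      && !PySem.Str.isIn "left hand" (PySem.Str.lower k)
      && !PySem.Str.isIn "right hand" (PySem.Str.lower k))),
   ("left hand", keys.filter (fun k => PySem.Str.isIn "left hand" (PySem.Str.lower k))),
   ("right hand", keys.filter (fun k => PySem.Str.isIn "right hand" (PySem.Str.lower k)
      && !PySem.Str.isIn "left hand" (PySem.Str.lower k)))]

-- ===== PRECONDITION & SPEC =====
def Spec_group_to_three (keys : List String) (out : List (String × List String)) : Prop := out = group_to_three_alt keys
instance (keys : List String) (out : List (String × List String)) : Decidable (Spec_group_to_three keys out) := by unfold Spec_group_to_three; infer_instance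

-- ===== CLAIM =====
def Claim_equal_group_to_three : Prop := ∀ (keys : List String), Dom_group_to_three keys → Spec_group_to_three keys (group_to_three keys)

-- ===== LEMMAS AND PROOFS =====
theorem gtt_loop (keys : List String) (h l r : List String) :
    (keys.foldl gttStep (PySem.Dict.mk [("head", h), ("left hand", l), ("right hand", r)])).items =
    [("head", h ++ keys.filter (fun k => PySem.Str.isIn "head" (PySem.Str.lower k)
        && !PySem.Str.isIn "left hand" (PySem.Str.lower k)
        && !PySem.Str.isIn "right hand" (PySem.Str.lower k))),
     ("left hand", l ++ keys.filter (fun k => PySem.Str.isIn "left hand" (PySem.Str.lower k))),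
     ("right hand", r ++ keys.filter (fun k => PySem.Str.isIn "right hand" (PySem.Str.lower k)
        && !PySem.Str.isIn "left hand" (PySem.Str.lower k)))] := by
  induction keys generalizing h l r with
  | nil => simp [PySem.Dict.items]
  | cons k ks ih =>
    rw [List.foldl_cons]
    by_cases hL : PySem.Str.isIn "left hand" (PySem.Str.lower k) = true
    · have hstep : gttStep (PySem.Dict.mk [("head", h), ("left hand", l), ("right hand", r)]) k
          = PySem.Dict.mk [("head", h), ("left hand", l ++ [k]), ("right hand", r)] := by
        simp only [gttStep]; rw [if_pos hL]; rfl
      rw [hstep, ih]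
      simp at hL
      simp [List.filter_cons, hL]
    · by_cases hR : PySem.Str.isIn "right hand" (PySem.Str.lower k) = true
      · have hstep : gttStep (PySem.Dict.mk [("head", h), ("left hand", l), ("right hand", r)]) k
            = PySem.Dict.mk [("head", h), ("left hand", l), ("right hand", r ++ [k])] := by
          simp only [gttStep]; rw [if_neg hL, if_pos hR]; rfl
        rw [hstep, ih]
        simp at hL hR
        simp [List.filter_cons, hL, hR]
      · by_cases hH : PySem.Str.isIn "head" (PySem.Str.lower k) = true
        · have hstep : gttStep (PySem.Dict.mk [("head", h), ("left hand", l), ("right hand", r)]) k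
              = PySem.Dict.mk [("head", h ++ [k]), ("left hand", l), ("right hand", r)] := by
            simp only [gttStep]; rw [if_neg hL, if_neg hR, if_pos hH]; rfl
          rw [hstep, ih]
          simp at hL hR hH
          simp [List.filter_cons, hL, hR, hH]
        · have hstep : gttStep (PySem.Dict.mk [("head", h), ("left hand", l), ("right hand", r)]) k
              = PySem.Dict.mk [("head", h), ("left hand", l), ("right hand", r)] := by
            simp only [gttStep]; rw [if_neg hL, if_neg hR, if_neg hH]
          rw [hstep, ih]
          simp at hL hR hH
          simp [List.filter_cons, hL, hR, hH]

-- ===== VERDICT =====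
theorem group_to_three_spec : Claim_equal_group_to_three := by
  intro keys _
  unfold Spec_group_to_three group_to_three group_to_three_alt
  have h0 : (PySem.Dict.ofList [("head", ([] : List String)), ("left hand", []), ("right hand", [])])
      = PySem.Dict.mk [("head", []), ("left hand", []), ("right hand", [])] := by rfl
  rw [h0, gtt_loop]
  simp
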